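-- pv_equiv track=rewrite | github.com/mjk0717/AI-Prompt-Battle | app.py | extract_assistant_message_preview
-- ===== SOURCE A (Python) =====
-- def extract_assistant_message_preview(text: str):
--     if not isinstance(text, str):
--         return "AI 평가를 생성 중입니다..."
--
--     stripped = text.strip()
--     if not stripped:
--         return "AI 평가를 생성 중입니다..."
--     if '"assistant_message"' not in stripped:
--         return stripped if not stripped.startswith("{") else "AI 평가를 생성 중입니다..."
--
--     key_index = stripped.find('"assistant_message"')
--     colon_index = stripped.find(":", key_index)
--     if colon_index < 0:
--         return "AI 평가를 생성 중입니다..."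
--
--     value_start = stripped.find('"', colon_index)
--     if value_start < 0:
--         return "AI 평가를 생성 중입니다..."
--
--     chars = []
--     escaped = False
--     for char in stripped[value_start + 1:]:
--         if escaped:
--             if char == "n":
--                 chars.append("\n")
--             elif char == "t":
--                 chars.append("\t")
--             else:
--                 chars.append(char)
--             escaped = False
--             continue
--         if char == "\\":
--             escaped = True
--             continue
--         if char == '"':
--             break
--         chars.append(char)
--
--     preview = "".join(chars).strip()
--     return preview or "AI 평가를 생성 중입니다..."
-- ===== SOURCE B (Python) =====
-- DEFAULT_MSG = "AI 평가를 생성 중입니다..."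
--
--
-- def extract_assistant_message_preview(text: str):
--     if not isinstance(text, str):
--         return DEFAULT_MSG
--
--     stripped = text.strip()
--     if not stripped:
--         return DEFAULT_MSG
--     if '"assistant_message"' not in stripped:
--         return stripped if not stripped.startswith("{") else DEFAULT_MSG
--
--     key_index = stripped.find('"assistant_message"')
--     colon_index = stripped.find(":", key_index)
--     if colon_index < 0:
--         return DEFAULT_MSG
--
--     value_start = stripped.find('"', colon_index)
--     if value_start < 0:
--         return DEFAULT_MSG
--
--     tail = stripped[value_start + 1:]
--
--     # pass 1: find the end of the value token by skipping escape pairs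
--     i, n = 0, len(tail)
--     while i < n and tail[i] != '"':
--         i += 2 if tail[i] == "\\" else 1
--     raw = tail[:i]  # i may overshoot by one past a lone trailing backslash; slicing clamps
--
--     # pass 2: decode the escape pairs of the raw token
--     out = []
--     j, m = 0, len(raw)
--     while j < m:
--         c = raw[j]
--         if c == "\\" and j + 1 < m:
--             d = raw[j + 1]
--             out.append("\n" if d == "n" else "\t" if d == "t" else d)
--             j += 2
--         elif c == "\\":
--             j += 1  # lone trailing backslash is dropped
--         else:
--             out.append(c)
--             j += 1
--
--     preview = "".join(out).strip()
--     return preview or DEFAULT_MSG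
-- ===== Notes on version B (the rewrite author's own statement) =====
-- stated objective: alternative
-- what changed: A's single-pass escape-flag state machine over the tail is replaced by two passes: first cut the raw value token at the first unescaped quote (stepping over escape pairs by index), then decode the escape pairs of that token.
import Mathlib
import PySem

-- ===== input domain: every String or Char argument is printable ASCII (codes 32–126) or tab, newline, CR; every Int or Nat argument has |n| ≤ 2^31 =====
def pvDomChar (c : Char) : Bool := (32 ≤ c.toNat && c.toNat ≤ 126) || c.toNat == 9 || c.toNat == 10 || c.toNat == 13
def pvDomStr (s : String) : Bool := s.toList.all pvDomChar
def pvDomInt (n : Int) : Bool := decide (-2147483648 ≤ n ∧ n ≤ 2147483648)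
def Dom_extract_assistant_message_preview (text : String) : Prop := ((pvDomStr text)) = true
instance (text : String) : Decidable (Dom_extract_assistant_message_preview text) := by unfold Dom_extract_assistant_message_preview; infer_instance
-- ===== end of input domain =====

-- B replaces A's single-pass boolean escape-flag state machine with two passes (cut the raw
-- value token at the first unescaped quote, then decode its escape pairs); same return value.

def pvMsg : String := "AI 평가를 생성 중입니다..."

-- ===== PORT A =====
-- A's for-loop over the tail with the `escaped` flag and the `chars` accumulator, with `break` on '"'.
def pvALoop : List Char → Bool → List Char → List Char
  | [], _, acc => acc
  | c :: cs, true, acc =>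
      pvALoop cs false (acc ++ [if c = 'n' then '\n' else if c = 't' then '\t' else c])
  | c :: cs, false, acc =>
      if c = '\\' then pvALoop cs true acc
      else if c = '"' then acc
      else pvALoop cs false (acc ++ [c])

def extract_assistant_message_preview (text : String) : String :=
  let stripped := PySem.Chars.strip text.toList
  if stripped = [] then pvMsg
  else if PySem.Chars.isIn "\"assistant_message\"".toList stripped = false then
    (if PySem.Chars.startswith stripped "{".toList = false then String.ofList stripped else pvMsg)
  else
    let key_index := PySem.Chars.find stripped "\"assistant_message\"".toList
    let colon_index := PySem.Chars.findFrom stripped ":".toList key_index none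
    if colon_index < 0 then pvMsg
    else
      let value_start := PySem.Chars.findFrom stripped "\"".toList colon_index none
      if value_start < 0 then pvMsg
      else
        let tail := PySem.Chars.slice stripped (some (value_start + 1)) none
        let preview := PySem.Chars.strip (pvALoop tail false [])
        if preview = [] then pvMsg else String.ofList preview

-- ===== PORT B =====
-- B's first while loop: step by 2 over an escape pair, stop at an unescaped '"'; returns tail[:i].
def pvCut : List Char → List Char
  | [] => []
  | c :: cs =>
      if c = '"' then []
      else if c = '\\' then
        match cs with
        | [] => [c]          -- i overshoots past the lone trailing backslash; the slice clamps
        | d :: cs' => c :: d :: pvCut cs'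
      else c :: pvCut cs

-- B's second while loop over raw, with the `out` accumulator.
def pvDecode : List Char → List Char → List Char
  | [], acc => acc
  | c :: cs, acc =>
      if c = '\\' then
        match cs with
        | [] => acc          -- lone trailing backslash is dropped
        | d :: cs' =>
            pvDecode cs' (acc ++ [if d = 'n' then '\n' else if d = 't' then '\t' else d])
      else pvDecode cs (acc ++ [c])

def extract_assistant_message_preview_alt (text : String) : String :=
  let stripped := PySem.Chars.strip text.toList
  if stripped = [] then pvMsg
  else if PySem.Chars.isIn "\"assistant_message\"".toList stripped = false then
    (if PySem.Chars.startswith stripped "{".toList = false then String.ofList stripped else pvMsg)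
  else
    let key_index := PySem.Chars.find stripped "\"assistant_message\"".toList
    let colon_index := PySem.Chars.findFrom stripped ":".toList key_index none
    if colon_index < 0 then pvMsg
    else
      let value_start := PySem.Chars.findFrom stripped "\"".toList colon_index none
      if value_start < 0 then pvMsg
      else
        let tail := PySem.Chars.slice stripped (some (value_start + 1)) none
        let raw := pvCut tail
        let preview := PySem.Chars.strip (pvDecode raw [])
        if preview = [] then pvMsg else String.ofList preview

-- ===== PRECONDITION & SPEC =====
def Spec_extract_assistant_message_preview (text : String) (out : String) : Prop := out = extract_assistant_message_preview_alt text
instance (text : String) (out : String) : Decidable (Spec_extract_assistant_message_preview text out) := by unfold Spec_extract_assistant_message_preview; infer_instance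

-- ===== CLAIM (what is proved, stated in full; the proofs are below) =====
def Claim_equal_extract_assistant_message_preview : Prop := ∀ (text : String), Dom_extract_assistant_message_preview text → Spec_extract_assistant_message_preview text (extract_assistant_message_preview text)

-- ===== LEMMAS AND PROOFS =====

-- one-step reduction lemmas for the three loops
lemma aloop_quote (cs acc : List Char) : pvALoop ('"'::cs) false acc = acc := by
  conv_lhs => rw [pvALoop.eq_def]
  all_goals simp
lemma aloop_esc (cs acc : List Char) : pvALoop ('\\'::cs) false acc = pvALoop cs true acc := by
  conv_lhs => rw [pvALoop.eq_def]
  all_goals simp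
lemma aloop_true (c : Char) (cs acc : List Char) :
    pvALoop (c::cs) true acc = pvALoop cs false (acc ++ [if c = 'n' then '\n' else if c = 't' then '\t' else c]) := by
  rw [pvALoop.eq_def]
lemma aloop_other (c : Char) (cs acc : List Char) (hq : ¬ c = '"') (hb : ¬ c = '\\') :
    pvALoop (c::cs) false acc = pvALoop cs false (acc ++ [c]) := by
  conv_lhs => rw [pvALoop.eq_def]
  all_goals simp [hq, hb]
lemma cut_quote (cs : List Char) : pvCut ('"'::cs) = [] := by
  conv_lhs => rw [pvCut.eq_def]
  all_goals simp
lemma cut_esc_nil : pvCut ['\\'] = ['\\'] := by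
  conv_lhs => rw [pvCut.eq_def]
  all_goals simp
lemma cut_esc (d : Char) (cs : List Char) : pvCut ('\\'::d::cs) = '\\'::d::pvCut cs := by
  conv_lhs => rw [pvCut.eq_def]
  all_goals simp
lemma cut_other (c : Char) (cs : List Char) (hq : ¬ c = '"') (hb : ¬ c = '\\') :
    pvCut (c::cs) = c :: pvCut cs := by
  conv_lhs => rw [pvCut.eq_def]
  all_goals simp [hq, hb]
lemma dec_esc_nil (acc : List Char) : pvDecode ['\\'] acc = acc := by
  conv_lhs => rw [pvDecode.eq_def]
  all_goals simp
lemma dec_esc (d : Char) (xs acc : List Char) :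
    pvDecode ('\\'::d::xs) acc = pvDecode xs (acc ++ [if d = 'n' then '\n' else if d = 't' then '\t' else d]) := by
  conv_lhs => rw [pvDecode.eq_def]
  all_goals simp
lemma dec_other (c : Char) (xs acc : List Char) (hb : ¬ c = '\\') :
    pvDecode (c::xs) acc = pvDecode xs (acc ++ [c]) := by
  conv_lhs => rw [pvDecode.eq_def]
  all_goals simp [hb]

-- A's flag loop computes the same characters as B's cut-then-decode passes
lemma pvCoreN : ∀ (n : Nat) (cs : List Char), cs.length ≤ n → ∀ acc,
    pvALoop cs false acc = pvDecode (pvCut cs) acc := by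
  intro n
  induction n with
  | zero =>
    intro cs h acc
    cases cs with
    | nil => rfl
    | cons c cs' => simp at h
  | succ n ih =>
    intro cs h acc
    cases cs with
    | nil => rfl
    | cons c cs' =>
      by_cases hq : c = '"'
      · subst hq; rw [aloop_quote, cut_quote]; rfl
      · by_cases hb : c = '\\'
        · subst hb
          cases cs' with
          | nil => rw [aloop_esc, cut_esc_nil, dec_esc_nil]; rfl
          | cons d cs'' =>
            have hlen : cs''.length ≤ n := by simp at h; omega
            rw [aloop_esc, aloop_true, cut_esc, dec_esc, ih cs'' hlen]
        · have hlen : cs'.length ≤ n := by simp at h; omega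
          rw [aloop_other c cs' acc hq hb, cut_other c cs' hq hb, dec_other c _ acc hb,
            ih cs' hlen]

lemma pvCore (cs acc : List Char) : pvALoop cs false acc = pvDecode (pvCut cs) acc :=
  pvCoreN cs.length cs le_rfl acc

-- ===== VERDICT (by name: the statement is the Claim_ definition above) =====
theorem extract_assistant_message_preview_spec : Claim_equal_extract_assistant_message_preview := by
  intro text _
  unfold Spec_extract_assistant_message_preview extract_assistant_message_preview extract_assistant_message_preview_alt
  simp only [pvCore]
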